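-- pv_equiv track=rewrite | github.com/markmckenna/advent-of-code | 2023/d13p2.py | symmetrical
-- ===== SOURCE A (Python) =====
-- def symmetrical(arr, idx):
--     """Returns true iff [arr] is symmetrical about [idx], not counting overflow rows. An array
--        is symmetrical if neither side of [idx] contains an entry that is mismatched to the
--        corresponding entry on the other side. Note that this means that an array will always
--        be 'symmetrical' around 0 and [length], because there are no values to refute with."""
--
--     l = len(arr)
--     if not 0 <= idx <= l: raise IndexError('Index out of range')
--
--     iters = max(idx, l-idx)
--     for i in range(iters):
--         low,high = idx-i-1,idx+i
--         if low < 0 or high >= l: break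
--         if arr[low] != arr[high]:
--             return False
--     return True
-- ===== SOURCE B (Python) =====
-- def symmetrical(arr, idx):
--     """Returns true iff [arr] is symmetrical about [idx], not counting overflow rows."""
--     l = len(arr)
--     if not 0 <= idx <= l: raise IndexError('Index out of range')
--     n = min(idx, l - idx)
--     return arr[idx-n:idx][::-1] == arr[idx:idx+n]
-- ===== Notes on version B (the rewrite author's own statement) =====
-- stated objective: simpler
-- what changed: Replaces the indexed loop with mirror-pair comparisons and an early break by computing the overlap width n = min(idx, l-idx) and comparing the reversed left slice to the right slice in one bulk list equality.
import Mathlib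
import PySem

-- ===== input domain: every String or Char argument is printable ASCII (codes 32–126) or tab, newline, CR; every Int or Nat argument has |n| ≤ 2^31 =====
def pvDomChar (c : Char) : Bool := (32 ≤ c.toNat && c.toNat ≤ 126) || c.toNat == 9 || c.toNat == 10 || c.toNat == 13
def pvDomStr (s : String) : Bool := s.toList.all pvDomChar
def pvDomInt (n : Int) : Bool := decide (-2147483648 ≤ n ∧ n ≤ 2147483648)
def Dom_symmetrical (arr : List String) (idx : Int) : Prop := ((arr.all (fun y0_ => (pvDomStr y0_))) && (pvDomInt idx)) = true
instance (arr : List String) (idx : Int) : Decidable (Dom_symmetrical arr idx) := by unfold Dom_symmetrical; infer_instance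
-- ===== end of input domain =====

-- B replaces A's per-pair loop with n = min(idx, l-idx) and one bulk equality of the reversed left slice against the right slice (objective: simpler).

-- ===== PORT A =====
-- the for-loop of A as fuel recursion over the loop counter i; pyGetD is used only
-- when the in-range guard of A has passed, so the default is never read
def symLoopA (arr : List String) (idx l : Int) : Nat → Int → Bool
  | 0, _ => true
  | fuel + 1, i =>
    let low := idx - i - 1
    let high := idx + i
    if low < 0 ∨ high ≥ l then true
    else if PySem.List.pyGetD arr low "" ≠ PySem.List.pyGetD arr high "" then false
    else symLoopA arr idx l fuel (i + 1)

def symmetrical (arr : List String) (idx : Int) : Bool :=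
  let l : Int := arr.length
  if ¬ (0 ≤ idx ∧ idx ≤ l) then false   -- Python raises IndexError here; excluded by Pre_
  else symLoopA arr idx l (max idx (l - idx)).toNat 0

-- ===== PORT B =====
def symmetrical_alt (arr : List String) (idx : Int) : Bool :=
  let l : Int := arr.length
  if ¬ (0 ≤ idx ∧ idx ≤ l) then false   -- Python raises IndexError here; excluded by Pre_
  else
    let n := min idx (l - idx)
    -- arr[idx-n:idx][::-1] == arr[idx:idx+n]; [::-1] is List.reverse (PySem.List.slice?_none_none_neg_one)
    (PySem.List.slice arr (some (idx - n)) (some idx)).reverse == PySem.List.slice arr (some idx) (some (idx + n))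

-- ===== PRECONDITION & SPEC =====
-- exactly the inputs where A returns (otherwise the guard raises IndexError)
def Pre_symmetrical (arr : List String) (idx : Int) : Prop := 0 ≤ idx ∧ idx ≤ (arr.length : Int)
instance (arr : List String) (idx : Int) : Decidable (Pre_symmetrical arr idx) := by unfold Pre_symmetrical; infer_instance
def pvWitness_symmetrical : List String × Int := (["a", "b", "b", "a"], 2)

def Spec_symmetrical (arr : List String) (idx : Int) (out : Bool) : Prop := out = symmetrical_alt arr idx
instance (arr : List String) (idx : Int) (out : Bool) : Decidable (Spec_symmetrical arr idx out) := by unfold Spec_symmetrical; infer_instance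

-- ===== CLAIM (what is proved, stated in full; the proofs are below) =====
def Claim_equal_symmetrical : Prop := ∀ (arr : List String) (idx : Int), Dom_symmetrical arr idx → Pre_symmetrical arr idx → Spec_symmetrical arr idx (symmetrical arr idx)

-- ===== LEMMAS AND PROOFS =====

-- the number of mirror pairs both programs actually examine
def pvNTop (arr : List String) (idx : Int) : Nat := (min idx ((arr.length : Int) - idx)).toNat

-- A's loop from counter i with the given fuel decides equality of all remaining mirror pairs
lemma symLoopA_eq (arr : List String) (idx : Int) (hidx : 0 ≤ idx) (hle : idx ≤ (arr.length : Int))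
    (fuel : Nat) (i : Nat) :
    symLoopA arr idx (arr.length : Int) fuel (i : Int) =
      decide (∀ j : Nat, j < min fuel (pvNTop arr idx - i) →
        PySem.List.pyGetD arr (idx - (i + j) - 1) "" = PySem.List.pyGetD arr (idx + (i + j)) "") := by
  induction fuel generalizing i with
  | zero =>
    simp [symLoopA]
  | succ fuel ih =>
    have hnt : (pvNTop arr idx : Int) = min idx ((arr.length : Int) - idx) := by
      unfold pvNTop; omega
    simp only [symLoopA]
    by_cases hbreak : idx - (i : Int) - 1 < 0 ∨ idx + (i : Int) ≥ (arr.length : Int)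
    · rw [if_pos hbreak]
      have hmin : min (fuel + 1) (pvNTop arr idx - i) = 0 := by omega
      rw [hmin]
      simp
    · rw [if_neg hbreak]
      push_neg at hbreak
      have hlt : i < pvNTop arr idx := by omega
      by_cases heq : PySem.List.pyGetD arr (idx - (i : Int) - 1) "" = PySem.List.pyGetD arr (idx + (i : Int)) ""
      · rw [if_neg (by simpa using heq)]
        have hcast : ((i : Int) + 1) = ((i + 1 : Nat) : Int) := by push_cast; ring
        rw [hcast, ih (i + 1)]
        congr 1
        apply propext
        constructor
        · intro h j hj
          rcases Nat.eq_zero_or_pos j with rfl | hj0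
          · simpa using heq
          · have := h (j - 1) (by omega)
            convert this using 3 <;> push_cast <;> omega
        · intro h j hj
          have := h (j + 1) (by omega)
          convert this using 3 <;> push_cast <;> omega
      · rw [if_pos (by simpa using heq)]
        symm; rw [decide_eq_false_iff_not]
        intro h
        exact heq (by simpa using h 0 (by omega))

-- B's slice comparison decides the same pairwise property
lemma alt_slices_eq (arr : List String) (idx : Int) (hidx : 0 ≤ idx) (hle : idx ≤ (arr.length : Int)) :
    ((PySem.List.slice arr (some (idx - min idx ((arr.length : Int) - idx))) (some idx)).reverse
      == PySem.List.slice arr (some idx) (some (idx + min idx ((arr.length : Int) - idx)))) =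
      decide (∀ t : Nat, t < pvNTop arr idx →
        PySem.List.pyGetD arr (idx - t - 1) "" = PySem.List.pyGetD arr (idx + t) "") := by
  have hnt : (pvNTop arr idx : Int) = min idx ((arr.length : Int) - idx) := by
    unfold pvNTop; omega
  set N := pvNTop arr idx with hN
  have hNidx : N ≤ idx.toNat := by omega
  have hNL : idx.toNat + N ≤ arr.length := by omega
  rw [show idx - min idx ((arr.length : Int) - idx) = idx - (N : Int) by omega,
      show idx + min idx ((arr.length : Int) - idx) = idx + (N : Int) by omega]
  rw [PySem.List.slice_toNat arr (a := idx - (N : Int)) (b := idx) (by omega) (by omega),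
      PySem.List.slice_toNat arr (a := idx) (b := idx + (N : Int)) (by omega) (by omega)]
  have h1 : idx.toNat - (idx - (N : Int)).toNat = N := by omega
  have h2 : (idx + (N : Int)).toNat - idx.toNat = N := by omega
  have h3 : (idx - (N : Int)).toNat = idx.toNat - N := by omega
  rw [h1, h2, h3]
  rw [Bool.beq_eq_decide_eq]
  congr 1
  apply propext
  have hlenL : ((arr.drop (idx.toNat - N)).take N).length = N := by
    simp; omega
  have hlenR : ((arr.drop idx.toNat).take N).length = N := by
    simp; omega
  have hpt : ∀ t : Nat, (ht : t < N) →
      (PySem.List.pyGetD arr (idx - t - 1) "" = PySem.List.pyGetD arr (idx + t) "" ↔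
        arr[idx.toNat - 1 - t]'(by omega) = arr[idx.toNat + t]'(by omega)) := by
    intro t ht
    have e1 := PySem.List.pyGetD_eq_getElem arr (i := idx - t - 1) "" (by omega) (by omega)
    have e2 := PySem.List.pyGetD_eq_getElem arr (i := idx + t) "" (by omega) (by omega)
    rw [e1, e2]
    simp only [show (idx - (t : Int) - 1).toNat = idx.toNat - 1 - t from by omega,
               show (idx + (t : Int)).toNat = idx.toNat + t from by omega]
  have hLch : ∀ (t : Nat) (h : t < N),
      (((arr.drop (idx.toNat - N)).take N).reverse)[t]'(by rw [List.length_reverse, hlenL]; exact h)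
        = arr[idx.toNat - 1 - t]'(by omega) := by
    intro t h
    rw [List.getElem_reverse, List.getElem_take, List.getElem_drop]
    congr 1
    rw [hlenL]
    omega
  have hRch : ∀ (t : Nat) (h : t < N),
      ((arr.drop idx.toNat).take N)[t]'(by rw [hlenR]; exact h)
        = arr[idx.toNat + t]'(by omega) := by
    intro t h
    rw [List.getElem_take, List.getElem_drop]
  constructor
  · intro h t ht
    rw [hpt t ht, ← hLch t ht, ← hRch t ht]
    exact List.getElem_of_eq h _
  · intro h
    apply List.ext_getElem
    · rw [List.length_reverse, hlenL, hlenR]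
    · intro t h1 h2
      have ht : t < N := by rwa [hlenR] at h2
      rw [hLch t ht, hRch t ht]
      exact (hpt t ht).mp (h t ht)

-- ===== VERDICT (by name: the statement is the Claim_ definition above) =====
theorem symmetrical_spec : Claim_equal_symmetrical := by
  intro arr idx _ hpre
  obtain ⟨h0, hl⟩ := hpre
  unfold Spec_symmetrical symmetrical symmetrical_alt
  simp only []
  rw [if_neg (not_not_intro ⟨h0, hl⟩), if_neg (not_not_intro ⟨h0, hl⟩)]
  rw [show (0 : Int) = ((0 : Nat) : Int) from rfl, symLoopA_eq arr idx h0 hl _ 0,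
      alt_slices_eq arr idx h0 hl]
  congr 1
  apply propext
  have hfuel : pvNTop arr idx ≤ (max idx ((arr.length : Int) - idx)).toNat := by
    unfold pvNTop; omega
  constructor
  · intro h t ht
    have := h t (by omega)
    simpa using this
  · intro h j hj
    have := h j (by omega)
    simpa using this
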